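-- pv_equiv track=rewrite | github.com/twu31/Python-Machine-Problems | Recursion.py | deciding_count
-- ===== SOURCE A (Python) =====
-- def deciding_count(blocks1,tocheck, for_votes=0, against_votes=0):
--     if not blocks1 and ((tocheck + for_votes) < against_votes or (tocheck+against_votes) < for_votes):
--         return 0
--     elif not blocks1:
--         if ((tocheck+for_votes) >= against_votes ) or ((tocheck+against_votes) >= for_votes):
--             return 1
--     else:
--         num=blocks1[0]
--         return deciding_count(blocks1[1:],tocheck,for_votes+num,against_votes) + deciding_count(blocks1[1:],tocheck,for_votes,against_votes+num)
-- ===== SOURCE B (Python) =====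
-- def deciding_count(blocks1, tocheck, for_votes=0, against_votes=0):
--     # DP over the achievable (for - against) differences: count assignments per difference.
--     counts = {for_votes - against_votes: 1}
--     for num in blocks1:
--         new = {}
--         for d, c in counts.items():
--             new[d + num] = new.get(d + num, 0) + c
--             new[d - num] = new.get(d - num, 0) + c
--         counts = new
--     return sum(c for d, c in counts.items() if -tocheck <= d <= tocheck)
-- ===== Notes on version B (the rewrite author's own statement) =====
-- stated objective: faster
-- what changed: Replaces A's O(2^n) two-way branching recursion over sign assignments with a dictionary dynamic program that counts assignments per achievable (for - against) difference and sums the counts with |difference| <= tocheck at the end.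
import Mathlib
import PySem

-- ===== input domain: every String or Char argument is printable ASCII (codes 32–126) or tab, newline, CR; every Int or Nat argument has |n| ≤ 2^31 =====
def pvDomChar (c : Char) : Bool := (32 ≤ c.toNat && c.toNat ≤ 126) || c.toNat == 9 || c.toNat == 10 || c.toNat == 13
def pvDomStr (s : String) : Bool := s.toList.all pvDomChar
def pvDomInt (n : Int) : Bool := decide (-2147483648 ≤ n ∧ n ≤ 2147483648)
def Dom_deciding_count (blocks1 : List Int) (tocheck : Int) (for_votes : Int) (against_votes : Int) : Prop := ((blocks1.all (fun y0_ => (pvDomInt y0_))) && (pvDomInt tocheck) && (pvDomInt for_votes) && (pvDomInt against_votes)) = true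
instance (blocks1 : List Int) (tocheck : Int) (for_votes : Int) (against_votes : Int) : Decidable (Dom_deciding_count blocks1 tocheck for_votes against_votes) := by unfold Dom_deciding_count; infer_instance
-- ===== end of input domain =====

-- B replaces A's O(2^n) branching recursion by a dictionary DP counting assignments per achievable
-- (for - against) difference (asymptotically faster when block values are bounded).

-- ===== PORT A =====
def deciding_count (blocks1 : List Int) (tocheck : Int) (for_votes : Int) (against_votes : Int) : Int :=
  match blocks1 with
  | [] =>
    if tocheck + for_votes < against_votes ∨ tocheck + against_votes < for_votes then 0
    else if tocheck + for_votes ≥ against_votes ∨ tocheck + against_votes ≥ for_votes then 1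
    else 0  -- Python falls off the function here (None); this branch is unreachable (¬first implies second)
  | num :: rest =>
    deciding_count rest tocheck (for_votes + num) against_votes
      + deciding_count rest tocheck for_votes (against_votes + num)

-- ===== PORT B =====
-- new[k] = new.get(k, 0) + c
def pvAddTo (new : PySem.Dict Int Int) (k c : Int) : PySem.Dict Int Int :=
  new.insert k (new.getD k 0 + c)

-- one pass of B's outer loop: rebuild the difference counter for one block
def pvStep (counts : PySem.Dict Int Int) (num : Int) : PySem.Dict Int Int :=
  counts.items.foldl (fun new p => pvAddTo (pvAddTo new (p.1 + num) p.2) (p.1 - num) p.2)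
    PySem.Dict.empty

def deciding_count_alt (blocks1 : List Int) (tocheck : Int) (for_votes : Int) (against_votes : Int) : Int :=
  let counts := (PySem.Dict.empty : PySem.Dict Int Int).insert (for_votes - against_votes) 1
  let final := blocks1.foldl pvStep counts
  ((final.items.filter (fun p => decide (-tocheck ≤ p.1) && decide (p.1 ≤ tocheck))).map
    (fun p => p.2)).sum

-- ===== PRECONDITION & SPEC =====
def Spec_deciding_count (blocks1 : List Int) (tocheck : Int) (for_votes : Int) (against_votes : Int) (out : Int) : Prop := out = deciding_count_alt blocks1 tocheck for_votes against_votes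
instance (blocks1 : List Int) (tocheck : Int) (for_votes : Int) (against_votes : Int) (out : Int) : Decidable (Spec_deciding_count blocks1 tocheck for_votes against_votes out) := by unfold Spec_deciding_count; infer_instance

-- ===== CLAIM (what is proved, stated in full; the proofs are below) =====
def Claim_equal_deciding_count : Prop := ∀ (blocks1 : List Int) (tocheck : Int) (for_votes : Int) (against_votes : Int), Dom_deciding_count blocks1 tocheck for_votes against_votes → Spec_deciding_count blocks1 tocheck for_votes against_votes (deciding_count blocks1 tocheck for_votes against_votes)

-- ===== LEMMAS AND PROOFS =====

-- A depends on for_votes/against_votes only through their difference; Acore is that reduction.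
def Acore (tc : Int) (bs : List Int) (d : Int) : Int :=
  match bs with
  | [] => if tc + d < 0 ∨ tc - d < 0 then 0 else 1
  | num :: rest => Acore tc rest (d + num) + Acore tc rest (d - num)

lemma A_eq_Acore (bs : List Int) (tc f a : Int) :
    deciding_count bs tc f a = Acore tc bs (f - a) := by
  induction bs generalizing f a with
  | nil => simp only [deciding_count, Acore]; split_ifs <;> omega
  | cons num rest ih =>
    simp only [deciding_count, Acore, ih]
    rw [show f + num - a = f - a + num from by ring,
        show f - (a + num) = f - a - num from by ring]

-- weighted sum of a counter's items against a weight function φ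
def pvS (φ : Int → Int) (l : List (Int × Int)) : Int :=
  (l.map (fun p => p.2 * φ p.1)).sum

lemma pvS_update (φ : Int → Int) (l : List (Int × Int)) (k v w : Int)
    (hnd : (l.map Prod.fst).Nodup) (hw : (k, w) ∈ l) :
    pvS φ (l.map (fun p => if p.1 == k then (k, v) else p)) = pvS φ l - w * φ k + v * φ k := by
  induction l with
  | nil => cases hw
  | cons q t ih =>
    simp only [List.map_cons, List.nodup_cons] at hnd
    rcases List.mem_cons.mp hw with hq | ht
    · subst hq
      have htid : t.map ((fun p => p.2 * φ p.1) ∘ fun p => if p.1 = k then ((k : Int), v) else p)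
          = t.map (fun p => p.2 * φ p.1) := by
        apply List.map_congr_left
        intro p hp
        have hne : p.1 ≠ (k : Int) := by
          intro h
          have hm : p.1 ∈ t.map Prod.fst := List.mem_map_of_mem hp
          rw [h] at hm
          exact hnd.1 hm
        simp [Function.comp, hne]
      simp [pvS]
      rw [htid]
      ring
    · have hk : (q.1 : Int) ≠ k := by
        intro h
        refine hnd.1 ?_
        rw [h]
        exact List.mem_map_of_mem ht
      have ih' := ih hnd.2 ht
      have hbq : ((q.1 : Int) == k) = false := by simp [hk]
      simp only [pvS, List.map_cons, List.sum_cons] at ih' ⊢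
      rw [hbq]
      simp only [Bool.false_eq_true, if_false]
      rw [ih']
      ring

lemma pvS_addTo (φ : Int → Int) (N : PySem.Dict Int Int) (k c : Int) (h : N.keys.Nodup) :
    pvS φ (pvAddTo N k c).items = pvS φ N.items + c * φ k := by
  unfold pvAddTo
  rcases hc : N.contains k with _ | _
  · rw [PySem.Dict.items_insert_of_not_contains _ _ hc,
        PySem.Dict.getD_of_not_contains _ _ hc]
    simp [pvS]
  · have hsome : (N.get? k).isSome := by rw [← PySem.Dict.contains_eq_isSome_get?, hc]
    obtain ⟨w, hw⟩ := Option.isSome_iff_exists.mp hsome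
    have hmem : (k, w) ∈ N.items := PySem.Dict.mem_items_of_get?_eq_some _ hw
    have hgd : N.getD k 0 = w := PySem.Dict.getD_of_get?_eq_some _ 0 hw
    rw [PySem.Dict.items_insert_of_contains _ _ hc, hgd]
    have hnd : (N.items.map Prod.fst).Nodup := by
      simpa only [PySem.Dict.keys] using h
    rw [pvS_update φ N.items k (w + c) w hnd hmem]
    ring

lemma addTo_keys_nodup (N : PySem.Dict Int Int) (k c : Int) (h : N.keys.Nodup) :
    (pvAddTo N k c).keys.Nodup := PySem.Dict.nodup_keys_insert _ _ _ h

lemma pvS_foldl (φ : Int → Int) (num : Int) (l : List (Int × Int)) (N : PySem.Dict Int Int)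
    (h : N.keys.Nodup) :
    pvS φ ((l.foldl (fun new p => pvAddTo (pvAddTo new (p.1 + num) p.2) (p.1 - num) p.2) N).items)
      = pvS φ N.items + (l.map (fun p => p.2 * (φ (p.1 + num) + φ (p.1 - num)))).sum := by
  induction l generalizing N with
  | nil => simp
  | cons p t ih =>
    simp only [List.foldl_cons, List.map_cons, List.sum_cons]
    rw [ih _ (addTo_keys_nodup _ _ _ (addTo_keys_nodup _ _ _ h)),
        pvS_addTo _ _ _ _ (addTo_keys_nodup _ _ _ h), pvS_addTo _ _ _ _ h]
    ring

lemma foldl_addTo_nodup (num : Int) (l : List (Int × Int)) (N : PySem.Dict Int Int)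
    (h : N.keys.Nodup) :
    ((l.foldl (fun new p => pvAddTo (pvAddTo new (p.1 + num) p.2) (p.1 - num) p.2) N)).keys.Nodup := by
  induction l generalizing N with
  | nil => exact h
  | cons p t ih =>
    exact ih _ (addTo_keys_nodup _ _ _ (addTo_keys_nodup _ _ _ h))

lemma pvStep_nodup (counts : PySem.Dict Int Int) (num : Int) : (pvStep counts num).keys.Nodup :=
  foldl_addTo_nodup num counts.items PySem.Dict.empty
    PySem.Dict.nodup_keys_empty

lemma pvS_pvStep (tc num : Int) (bs : List Int) (D : PySem.Dict Int Int) :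
    pvS (Acore tc bs) (pvStep D num).items = pvS (Acore tc (num :: bs)) D.items := by
  unfold pvStep
  rw [pvS_foldl (Acore tc bs) num D.items PySem.Dict.empty PySem.Dict.nodup_keys_empty]
  have h0 : pvS (Acore tc bs) (PySem.Dict.empty : PySem.Dict Int Int).items = 0 := rfl
  rw [h0, zero_add]
  unfold pvS
  congr 1

lemma filter_sum_eq (tc : Int) (l : List (Int × Int)) :
    ((l.filter (fun p => decide (-tc ≤ p.1) && decide (p.1 ≤ tc))).map (fun p => p.2)).sum
      = pvS (Acore tc []) l := by
  induction l with
  | nil => simp [pvS]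
  | cons p t ih =>
    by_cases h : -tc ≤ p.1 ∧ p.1 ≤ tc
    · have hif : Acore tc [] p.1 = 1 := by simp only [Acore]; split_ifs <;> omega
      simp [h.1, h.2, pvS, hif, ih]
    · have hb : (decide (-tc ≤ p.1) && decide (p.1 ≤ tc)) = false := by
        rcases not_and_or.mp h with h1 | h1 <;> simp [h1]
      have hif : Acore tc [] p.1 = 0 := by simp only [Acore]; split_ifs <;> omega
      simp [hb, pvS, hif, ih]

lemma main_inv (tc : Int) (bs : List Int) (D : PySem.Dict Int Int) (h : D.keys.Nodup) :
    (((bs.foldl pvStep D).items.filter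
        (fun p => decide (-tc ≤ p.1) && decide (p.1 ≤ tc))).map (fun p => p.2)).sum
      = pvS (Acore tc bs) D.items := by
  induction bs generalizing D with
  | nil => exact filter_sum_eq tc D.items
  | cons num rest ih =>
    simp only [List.foldl_cons]
    rw [ih (pvStep D num) (pvStep_nodup D num), pvS_pvStep]

-- ===== VERDICT (by name: the statement is the Claim_ definition above) =====
theorem deciding_count_spec : Claim_equal_deciding_count := by
  intro blocks1 tocheck for_votes against_votes _
  unfold Spec_deciding_count deciding_count_alt
  have hemp : ((PySem.Dict.empty : PySem.Dict Int Int).contains (for_votes - against_votes)) = false := by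
    simp
  rw [main_inv tocheck blocks1 _
      (PySem.Dict.nodup_keys_insert _ _ _ PySem.Dict.nodup_keys_empty)]
  rw [PySem.Dict.items_insert_of_not_contains _ _ hemp]
  have hie : (PySem.Dict.empty : PySem.Dict Int Int).items = [] := rfl
  rw [hie]
  simp [pvS, A_eq_Acore]
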